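-- pv_equiv track=rewrite | github.com/adityabisoi/ds-algo-solutions | Algorithms/Game Theory/Chessboard Game, Again!/solution.py | grundy
-- ===== SOURCE A (Python) =====
-- grun = {}
--
-- def grundy(x, y):
--     if 0 < x < 16 > y > 0:
--         if (x, y) not in grun:
--             a = {grundy(x - 2, y - 1), grundy(x - 2, y + 1), grundy(x - 1, y - 2), grundy(x + 1, y - 2)}
--             k = 0
--             while k in a:
--                 k += 1
--             grun[x, y] = k
--         return grun[x, y]
--     return -1
-- ===== SOURCE B (Python) =====
-- _table = None
--
-- def _build_table():
--     table = {}
--     for s in range(2, 31):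
--         for i in range(1, 16):
--             j = s - i
--             if 1 <= j <= 15:
--                 vals = {table.get((i - 2, j - 1), -1), table.get((i - 2, j + 1), -1),
--                         table.get((i - 1, j - 2), -1), table.get((i + 1, j - 2), -1)}
--                 k = 0
--                 while k in vals:
--                     k += 1
--                 table[(i, j)] = k
--     return table
--
-- def grundy(x, y):
--     global _table
--     if _table is None:
--         _table = _build_table()
--     if 1 <= x <= 15 and 1 <= y <= 15:
--         return _table[(x, y)]
--     return -1
-- ===== Notes on version B (the rewrite author's own statement) =====
-- stated objective: simpler
-- what changed: Replaced A's top-down memoized recursion (global dict, mutual re-entrant calls) by a bottom-up DP that fills the 15x15 Grundy table once in increasing x+y order, after which grundy is a plain table lookup.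
import Mathlib
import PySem

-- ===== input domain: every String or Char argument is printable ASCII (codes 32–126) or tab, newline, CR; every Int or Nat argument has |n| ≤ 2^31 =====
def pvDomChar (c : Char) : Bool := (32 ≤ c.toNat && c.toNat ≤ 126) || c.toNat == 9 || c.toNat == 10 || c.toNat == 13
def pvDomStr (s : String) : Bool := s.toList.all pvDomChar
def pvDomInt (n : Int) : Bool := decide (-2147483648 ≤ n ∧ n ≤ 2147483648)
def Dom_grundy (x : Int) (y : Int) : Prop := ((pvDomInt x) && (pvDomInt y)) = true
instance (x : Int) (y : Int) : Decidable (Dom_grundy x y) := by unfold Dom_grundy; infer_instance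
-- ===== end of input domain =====

-- B replaces A's top-down memoized recursion by a one-time bottom-up DP fill of the
-- 15×15 Grundy table in increasing x+y order (objective: simpler decomposition).

-- ===== PORT A =====
-- A's 'while k in a: k += 1'; a has at most 4 elements so 5 steps always suffice
def pvMexA (a : PySem.Set Int) (k : Int) : Nat → Int
  | 0 => k
  | fuel + 1 => if PySem.Set.contains a k then pvMexA a (k + 1) fuel else k

-- A's recursion with the global memo dict 'grun' threaded through explicitly.
-- fuel is only a structural-termination guard: every recursive call strictly
-- decreases x+y, so fuel = (x+y).toNat + 1 is never exhausted on an in-range call.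
def grundyMemo (fuel : Nat) (memo : PySem.Dict (Int × Int) Int) (x y : Int) :
    PySem.Dict (Int × Int) Int × Int :=
  if 0 < x ∧ x < 16 ∧ 0 < y ∧ y < 16 then
    match fuel with
    | 0 => (memo, -1)  -- unreachable with the stated fuel
    | fuel + 1 =>
      if memo.contains (x, y) then
        (memo, memo.getD (x, y) 0)
      else
        let r1 := grundyMemo fuel memo (x - 2) (y - 1)
        let r2 := grundyMemo fuel r1.1 (x - 2) (y + 1)
        let r3 := grundyMemo fuel r2.1 (x - 1) (y - 2)
        let r4 := grundyMemo fuel r3.1 (x + 1) (y - 2)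
        let a := PySem.Set.ofList [r1.2, r2.2, r3.2, r4.2]
        let k := pvMexA a 0 5
        let m := r4.1.insert (x, y) k
        (m, m.getD (x, y) 0)
  else (memo, -1)

def grundy (x : Int) (y : Int) : Int := (grundyMemo ((x + y).toNat + 1) PySem.Dict.empty x y).2

-- ===== PORT B =====
def pvMexB (vals : PySem.Set Int) (k : Int) : Nat → Int
  | 0 => k
  | fuel + 1 => if PySem.Set.contains vals k then pvMexB vals (k + 1) fuel else k

def pvTableB : PySem.Dict (Int × Int) Int :=
  (PySem.List.pyRange 2 31 1).foldl (fun t s =>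
    (PySem.List.pyRange 1 16 1).foldl (fun t i =>
      let j := s - i
      if 1 ≤ j ∧ j ≤ 15 then
        let vals := PySem.Set.ofList
          [t.getD (i - 2, j - 1) (-1), t.getD (i - 2, j + 1) (-1),
           t.getD (i - 1, j - 2) (-1), t.getD (i + 1, j - 2) (-1)]
        t.insert (i, j) (pvMexB vals 0 5)
      else t) t) PySem.Dict.empty

def grundy_alt (x : Int) (y : Int) : Int :=
  if 1 ≤ x ∧ x ≤ 15 ∧ 1 ≤ y ∧ y ≤ 15 then pvTableB.getD (x, y) 0 else -1

-- ===== PRECONDITION & SPEC =====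
def Spec_grundy (x : Int) (y : Int) (out : Int) : Prop := out = grundy_alt x y
instance (x : Int) (y : Int) (out : Int) : Decidable (Spec_grundy x y out) := by unfold Spec_grundy; infer_instance

-- ===== CLAIM (what is proved, stated in full; the proofs are below) =====
def Claim_equal_grundy : Prop := ∀ (x : Int) (y : Int), Dom_grundy x y → Spec_grundy x y (grundy x y)

-- ===== LEMMAS AND PROOFS =====

-- the mathematical Grundy function both ports compute
def gSpec (x y : Int) : Int :=
  if h : 0 < x ∧ x < 16 ∧ 0 < y ∧ y < 16 then
    pvMexA (PySem.Set.ofList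
      [gSpec (x - 2) (y - 1), gSpec (x - 2) (y + 1),
       gSpec (x - 1) (y - 2), gSpec (x + 1) (y - 2)]) 0 5
  else -1
termination_by (x + y).toNat
decreasing_by all_goals omega

theorem gSpec_out (x y : Int) (h : ¬(0 < x ∧ x < 16 ∧ 0 < y ∧ y < 16)) : gSpec x y = -1 := by
  rw [gSpec]; simp [h]

theorem gSpec_in (x y : Int) (h : 0 < x ∧ x < 16 ∧ 0 < y ∧ y < 16) :
    gSpec x y = pvMexA (PySem.Set.ofList
      [gSpec (x - 2) (y - 1), gSpec (x - 2) (y + 1),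
       gSpec (x - 1) (y - 2), gSpec (x + 1) (y - 2)]) 0 5 := by
  rw [gSpec]; simp [h]

theorem pvMexB_eq_pvMexA (n : Nat) : ∀ (a : PySem.Set Int) (k : Int), pvMexB a k n = pvMexA a k n := by
  induction n with
  | zero => intro a k; rfl
  | succ m ih => intro a k; simp only [pvMexA, pvMexB, ih]

-- ===== A side: the memo invariant =====
def MemoOK (m : PySem.Dict (Int × Int) Int) : Prop :=
  ∀ p v, m.get? p = some v → v = gSpec p.1 p.2

theorem memoA (fuel : Nat) : ∀ (x y : Int) (m : PySem.Dict (Int × Int) Int),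
    MemoOK m → (x + y).toNat < fuel →
    (grundyMemo fuel m x y).2 = gSpec x y ∧ MemoOK (grundyMemo fuel m x y).1 := by
  induction fuel with
  | zero => intro x y m _ hf; omega
  | succ n ih =>
    intro x y m hm hf
    by_cases h : 0 < x ∧ x < 16 ∧ 0 < y ∧ y < 16
    · rw [grundyMemo]
      simp only [if_pos h]
      by_cases hc : m.contains (x, y) = true
      · simp only [hc, if_true]
        refine ⟨?_, hm⟩
        have hsome : (m.get? (x, y)).isSome := by
          rw [← PySem.Dict.contains_eq_isSome_get?]; exact hc
        obtain ⟨v, hv⟩ := Option.isSome_iff_exists.mp hsome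
        rw [PySem.Dict.getD_eq_get?_getD, hv, Option.getD_some]
        exact hm (x, y) v hv
      · rw [Bool.not_eq_true] at hc
        simp only [hc, Bool.false_eq_true, if_false]
        obtain ⟨hv1, hm1⟩ := ih (x - 2) (y - 1) m hm (by omega)
        obtain ⟨hv2, hm2⟩ := ih (x - 2) (y + 1) _ hm1 (by omega)
        obtain ⟨hv3, hm3⟩ := ih (x - 1) (y - 2) _ hm2 (by omega)
        obtain ⟨hv4, hm4⟩ := ih (x + 1) (y - 2) _ hm3 (by omega)
        rw [hv1, hv2, hv3, hv4]
        constructor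
        · rw [PySem.Dict.getD_eq_get?_getD, PySem.Dict.get?_insert_self, Option.getD_some]
          exact (gSpec_in x y h).symm
        · intro p v hp
          rw [PySem.Dict.get?_insert] at hp
          by_cases hpeq : p = (x, y)
          · rw [if_pos hpeq] at hp
            cases hp
            rw [hpeq]
            exact (gSpec_in x y h).symm
          · rw [if_neg hpeq] at hp
            exact hm4 p v hp
    · rw [grundyMemo]
      simp only [if_neg h]
      exact ⟨(gSpec_out x y h).symm, hm⟩

theorem grundy_eq_gSpec (x y : Int) : grundy x y = gSpec x y := by
  have hEmpty : MemoOK PySem.Dict.empty := by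
    intro p v hp
    rw [PySem.Dict.get?_empty] at hp
    cases hp
  exact (memoA ((x + y).toNat + 1) x y PySem.Dict.empty hEmpty (by omega)).1

-- ===== B side: the table invariant =====
def stepB (s : Int) (t : PySem.Dict (Int × Int) Int) (i : Int) : PySem.Dict (Int × Int) Int :=
  let j := s - i
  if 1 ≤ j ∧ j ≤ 15 then
    let vals := PySem.Set.ofList
      [t.getD (i - 2, j - 1) (-1), t.getD (i - 2, j + 1) (-1),
       t.getD (i - 1, j - 2) (-1), t.getD (i + 1, j - 2) (-1)]
    t.insert (i, j) (pvMexB vals 0 5)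
  else t

theorem pvTableB_eq :
    pvTableB = (PySem.List.pyRange 2 31 1).foldl
      (fun t s => (PySem.List.pyRange 1 16 1).foldl (stepB s) t) PySem.Dict.empty := rfl

def TblOK (t : PySem.Dict (Int × Int) Int) (n : Int) : Prop :=
  ∀ a b : Int, t.get? (a, b) =
    if 1 ≤ a ∧ a ≤ 15 ∧ 1 ≤ b ∧ b ≤ 15 ∧ a + b ≤ n then some (gSpec a b) else none

def TblPart (t : PySem.Dict (Int × Int) Int) (s c : Int) : Prop :=
  ∀ a b : Int, t.get? (a, b) =
    if 1 ≤ a ∧ a ≤ 15 ∧ 1 ≤ b ∧ b ≤ 15 ∧ (a + b ≤ s - 1 ∨ (a + b = s ∧ a < c))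
    then some (gSpec a b) else none

theorem getD_eq_gSpec {t : PySem.Dict (Int × Int) Int} {s c : Int}
    (hInv : TblPart t s c) (a b : Int) (hs : a + b ≤ s - 1) :
    t.getD (a, b) (-1) = gSpec a b := by
  rw [PySem.Dict.getD_eq_get?_getD, hInv a b]
  by_cases hr : 1 ≤ a ∧ a ≤ 15 ∧ 1 ≤ b ∧ b ≤ 15
  · rw [if_pos (by exact ⟨hr.1, hr.2.1, hr.2.2.1, hr.2.2.2, Or.inl hs⟩), Option.getD_some]
  · rw [if_neg (by tauto), Option.getD_none, gSpec_out a b (by omega)]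

theorem innerStepB (s c : Int) (t : PySem.Dict (Int × Int) Int)
    (h1 : 1 ≤ c) (h2 : c ≤ 15) (hInv : TblPart t s c) : TblPart (stepB s t c) s (c + 1) := by
  unfold stepB
  by_cases hj : 1 ≤ s - c ∧ s - c ≤ 15
  · simp only [if_pos hj]
    have hv1 := getD_eq_gSpec hInv (c - 2) (s - c - 1) (by omega)
    have hv2 := getD_eq_gSpec hInv (c - 2) (s - c + 1) (by omega)
    have hv3 := getD_eq_gSpec hInv (c - 1) (s - c - 2) (by omega)
    have hv4 := getD_eq_gSpec hInv (c + 1) (s - c - 2) (by omega)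
    have hval : pvMexB (PySem.Set.ofList
        [t.getD (c - 2, s - c - 1) (-1), t.getD (c - 2, s - c + 1) (-1),
         t.getD (c - 1, s - c - 2) (-1), t.getD (c + 1, s - c - 2) (-1)]) 0 5 = gSpec c (s - c) := by
      rw [hv1, hv2, hv3, hv4, pvMexB_eq_pvMexA]
      rw [gSpec_in c (s - c) (by omega)]
    intro a b
    rw [PySem.Dict.get?_insert]
    by_cases hab : (a, b) = (c, s - c)
    · have hac : a = c := congrArg Prod.fst hab
      have hbc : b = s - c := congrArg Prod.snd hab
      subst hac; subst hbc
      rw [if_pos rfl, if_pos ⟨by omega, by omega, by omega, by omega, Or.inr ⟨by omega, by omega⟩⟩, hval]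
    · have hne : ¬(a = c ∧ b = s - c) := by
        intro ⟨ha, hb⟩; exact hab (by rw [ha, hb])
      rw [if_neg hab, hInv a b]
      exact if_congr (by omega) rfl rfl
  · simp only [if_neg hj]
    intro a b
    rw [hInv a b]
    exact if_congr (by omega) rfl rfl

theorem innerFoldB (k : Nat) : ∀ (c s : Int) (t : PySem.Dict (Int × Int) Int),
    (16 - c).toNat = k → 1 ≤ c → c ≤ 16 → TblPart t s c →
    TblPart ((PySem.List.pyRange c 16 1).foldl (stepB s) t) s 16 := by
  induction k with
  | zero =>
    intro c s t hk h1 h2 hInv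
    have hc : c = 16 := by omega
    subst hc
    rw [PySem.List.pyRange_one_eq_nil (by omega)]
    exact hInv
  | succ n ih =>
    intro c s t hk h1 h2 hInv
    have hc : c < 16 := by omega
    rw [PySem.List.pyRange_one_cons hc, List.foldl_cons]
    exact ih (c + 1) s (stepB s t c) (by omega) (by omega) (by omega)
      (innerStepB s c t h1 (by omega) hInv)

theorem outerStepB (s : Int) (t : PySem.Dict (Int × Int) Int)
    (_hs : 2 ≤ s) (hInv : TblOK t (s - 1)) :
    TblOK ((PySem.List.pyRange 1 16 1).foldl (stepB s) t) s := by
  have hpart : TblPart t s 1 := by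
    intro a b
    rw [hInv a b]
    exact if_congr (by omega) rfl rfl
  have h16 := innerFoldB 15 1 s t (by omega) (by omega) (by omega) hpart
  intro a b
  rw [h16 a b]
  exact if_congr (by omega) rfl rfl

theorem outerFoldB (k : Nat) : ∀ (s : Int) (t : PySem.Dict (Int × Int) Int),
    (31 - s).toNat = k → 2 ≤ s → s ≤ 31 → TblOK t (s - 1) →
    TblOK ((PySem.List.pyRange s 31 1).foldl
      (fun t s => (PySem.List.pyRange 1 16 1).foldl (stepB s) t) t) 30 := by
  induction k with
  | zero =>
    intro s t hk h1 h2 hInv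
    have hs : s = 31 := by omega
    subst hs
    rw [PySem.List.pyRange_one_eq_nil (le_refl (31 : Int))]
    simpa using hInv
  | succ n ih =>
    intro s t hk h1 h2 hInv
    have hs : s < 31 := by omega
    rw [PySem.List.pyRange_one_cons hs, List.foldl_cons]
    exact ih (s + 1) _ (by omega) (by omega) (by omega)
      (by simpa using outerStepB s t h1 hInv)

theorem tableB_ok : TblOK pvTableB 30 := by
  rw [pvTableB_eq]
  apply outerFoldB 29 2 PySem.Dict.empty (by omega) (by omega) (by omega)
  intro a b
  rw [PySem.Dict.get?_empty, if_neg (by omega)]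

theorem grundy_alt_eq_gSpec (x y : Int) : grundy_alt x y = gSpec x y := by
  unfold grundy_alt
  by_cases h : 1 ≤ x ∧ x ≤ 15 ∧ 1 ≤ y ∧ y ≤ 15
  · rw [if_pos h, PySem.Dict.getD_eq_get?_getD, tableB_ok x y,
      if_pos ⟨h.1, h.2.1, h.2.2.1, h.2.2.2, by omega⟩, Option.getD_some]
  · have h' : ¬(0 < x ∧ x < 16 ∧ 0 < y ∧ y < 16) := by
      intro hc; exact h ⟨by omega, by omega, by omega, by omega⟩
    rw [if_neg h, gSpec_out x y h']

-- ===== VERDICT (by name: the statement is the Claim_ definition above) =====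
theorem grundy_spec : Claim_equal_grundy := by
  intro x y _
  unfold Spec_grundy
  rw [grundy_eq_gSpec, grundy_alt_eq_gSpec]
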